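-- pv_equiv track=rewrite | github.com/D-X-Y/AutoDL-Projects | exps/NATS-Bench/main-sss.py | traverse_net
-- ===== SOURCE A (Python) =====
-- from typing import List, Text, Dict, Any
--
-- def traverse_net(candidates: List[int], N: int):
--     nets = [""]
--     for i in range(N):
--         new_nets = []
--         for net in nets:
--             for C in candidates:
--                 new_nets.append(str(C) if net == "" else "{:}:{:}".format(net, C))
--         nets = new_nets
--     return nets
-- ===== SOURCE B (Python) =====
-- def traverse_net(candidates, N):
--     if N <= 0:
--         return [""]
--     prefixes = traverse_net(candidates, N - 1)
--     return [str(C) if p == "" else "{:}:{:}".format(p, C) for p in prefixes for C in candidates]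
-- ===== Notes on version B (the rewrite author's own statement) =====
-- stated objective: alternative
-- what changed: Replaces the iterative maintained-frontier expansion (rebuild the whole nets list each of N rounds with an explicit append accumulator) by a recursion on N: prefixes of length N-1 are computed recursively and extended once by a comprehension.
import Mathlib
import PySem

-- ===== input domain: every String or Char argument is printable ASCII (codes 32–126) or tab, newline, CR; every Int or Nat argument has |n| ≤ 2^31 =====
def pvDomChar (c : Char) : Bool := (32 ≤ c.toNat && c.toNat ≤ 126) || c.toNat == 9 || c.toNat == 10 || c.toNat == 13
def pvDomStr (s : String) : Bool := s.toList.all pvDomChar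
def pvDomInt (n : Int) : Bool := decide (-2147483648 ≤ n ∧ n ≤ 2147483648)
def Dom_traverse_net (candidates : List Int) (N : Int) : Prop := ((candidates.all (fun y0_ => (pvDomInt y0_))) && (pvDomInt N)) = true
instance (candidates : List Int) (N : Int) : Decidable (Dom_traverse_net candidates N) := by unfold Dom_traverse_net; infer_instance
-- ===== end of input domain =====

-- B replaces A's iterative frontier rebuild by a structural recursion on N (same output, same cost).

-- ===== PORT A =====
-- literal port: for i in range(N): rebuild nets via nested appends
def traverse_net (candidates : List Int) (N : Int) : List String :=
  (PySem.List.pyRange 0 N 1).foldl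
    (fun nets _ =>
      nets.foldl
        (fun new_nets net =>
          candidates.foldl
            (fun new_nets C =>
              new_nets ++ [if net == "" then PySem.Int.toStr C
                           else net ++ ":" ++ PySem.Int.toStr C])
            new_nets)
        [])
    [""]

-- ===== PORT B =====
def traverse_net_alt (candidates : List Int) (N : Int) : List String :=
  if N ≤ 0 then [""]
  else
    (traverse_net_alt candidates (N - 1)).flatMap
      (fun p => candidates.map
        (fun C => if p == "" then PySem.Int.toStr C
                  else p ++ ":" ++ PySem.Int.toStr C))
termination_by N.toNat
decreasing_by omega

-- ===== PRECONDITION & SPEC =====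
def Spec_traverse_net (candidates : List Int) (N : Int) (out : List String) : Prop := out = traverse_net_alt candidates N
instance (candidates : List Int) (N : Int) (out : List String) : Decidable (Spec_traverse_net candidates N out) := by unfold Spec_traverse_net; infer_instance

-- ===== CLAIM (what is proved, stated in full; the proofs are below) =====
def Claim_equal_traverse_net : Prop := ∀ (candidates : List Int) (N : Int), Dom_traverse_net candidates N → Spec_traverse_net candidates N (traverse_net candidates N)

-- ===== LEMMAS AND PROOFS =====

-- the one-round expansion both programs perform
def pvStep (candidates : List Int) (nets : List String) : List String :=
  nets.flatMap
    (fun p => candidates.map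
      (fun C => if p == "" then PySem.Int.toStr C
                else p ++ ":" ++ PySem.Int.toStr C))

-- A's inner double loop with append-accumulator is pvStep
theorem inner_eq_step (candidates : List Int) (nets acc : List String) :
    nets.foldl
      (fun new_nets net =>
        candidates.foldl
          (fun new_nets C =>
            new_nets ++ [if net == "" then PySem.Int.toStr C
                         else net ++ ":" ++ PySem.Int.toStr C])
          new_nets)
      acc = acc ++ pvStep candidates nets := by
  induction nets generalizing acc with
  | nil => simp [pvStep]
  | cons n ns ih =>
    rw [List.foldl_cons, PySem.List.foldl_append_singleton_eq_map, ih]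
    simp [pvStep]

-- a foldl that ignores the index is function iteration
theorem foldl_const_iterate {α β : Type} (f : α → α) (l : List β) (init : α) :
    l.foldl (fun s _ => f s) init = f^[l.length] init := by
  induction l generalizing init with
  | nil => rfl
  | cons x xs ih => simp [List.foldl_cons, ih, Function.iterate_succ_apply]

theorem traverse_net_eq_iterate (candidates : List Int) (N : Int) :
    traverse_net candidates N = (pvStep candidates)^[N.toNat] [""] := by
  unfold traverse_net
  have h : ∀ (nets : List String),
      (fun nets (_ : Int) =>
        nets.foldl
          (fun new_nets net =>
            candidates.foldl
              (fun new_nets C =>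
                new_nets ++ [if net == "" then PySem.Int.toStr C
                             else net ++ ":" ++ PySem.Int.toStr C])
              new_nets)
          ([] : List String)) nets 0 = pvStep candidates nets := by
    intro nets; simpa using inner_eq_step candidates nets []
  calc (PySem.List.pyRange 0 N 1).foldl
        (fun nets _ =>
          nets.foldl
            (fun new_nets net =>
              candidates.foldl
                (fun new_nets C =>
                  new_nets ++ [if net == "" then PySem.Int.toStr C
                               else net ++ ":" ++ PySem.Int.toStr C])
                new_nets)
            [])
        [""]
      = (PySem.List.pyRange 0 N 1).foldl (fun nets _ => pvStep candidates nets) [""] := by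
        apply List.foldl_ext
        intro nets i _
        simpa using inner_eq_step candidates nets []
    _ = (pvStep candidates)^[(PySem.List.pyRange 0 N 1).length] [""] :=
        foldl_const_iterate _ _ _
    _ = (pvStep candidates)^[N.toNat] [""] := by
        rw [PySem.List.length_pyRange_one]; norm_num

theorem traverse_net_alt_eq_iterate (candidates : List Int) (N : Int) :
    traverse_net_alt candidates N = (pvStep candidates)^[N.toNat] [""] := by
  by_cases h : N ≤ 0
  · rw [traverse_net_alt]
    simp [h, Int.toNat_of_nonpos h]
  · rw [traverse_net_alt]
    simp only [h, if_false]
    rw [traverse_net_alt_eq_iterate candidates (N - 1)]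
    have hn : N.toNat = (N - 1).toNat + 1 := by omega
    rw [hn, Function.iterate_succ_apply']
    rfl
termination_by N.toNat
decreasing_by omega

-- ===== VERDICT (by name: the statement is the Claim_ definition above) =====
theorem traverse_net_spec : Claim_equal_traverse_net := by
  intro candidates N _
  unfold Spec_traverse_net
  rw [traverse_net_eq_iterate, traverse_net_alt_eq_iterate]
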